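-- pv_equiv track=rewrite | github.com/JLJTECH/PracticeProblems | CodeWars/2016/HellsKitchen-7k.py | gordon
-- ===== SOURCE A (Python) =====
-- def gordon(a):
--     a = a.upper()
--     a = a.replace(' ', '!!!! ')
--     a = a.replace('A', '@')
--     VL = ['E', 'I', 'O', 'U']
--     for i in VL:
--         a = a.replace(i, '*')
--     return a + '!!!!'
-- ===== SOURCE B (Python) =====
-- def gordon(a):
--     table = {' ': '!!!! ', 'A': '@', 'E': '*', 'I': '*', 'O': '*', 'U': '*'}
--     return ''.join(table.get(c, c) for c in a.upper()) + '!!!!'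
-- ===== Notes on version B (the rewrite author's own statement) =====
-- stated objective: idiomatic
-- what changed: Replaces the six sequential whole-string replace passes with a single table-driven scan: a dict maps space and each vowel to its replacement and the uppercased input is joined in one pass.
import Mathlib
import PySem

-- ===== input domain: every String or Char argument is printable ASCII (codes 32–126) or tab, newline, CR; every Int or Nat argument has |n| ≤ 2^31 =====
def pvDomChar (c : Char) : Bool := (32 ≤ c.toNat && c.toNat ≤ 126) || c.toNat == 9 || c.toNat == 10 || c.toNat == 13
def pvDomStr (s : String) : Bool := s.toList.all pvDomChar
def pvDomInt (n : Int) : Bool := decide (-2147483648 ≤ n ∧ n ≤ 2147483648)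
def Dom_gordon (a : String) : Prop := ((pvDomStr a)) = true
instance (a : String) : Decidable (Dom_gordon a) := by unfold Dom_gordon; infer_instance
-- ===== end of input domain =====

-- B replaces A's six sequential whole-string .replace passes with one table-driven pass (idiomatic single scan).

-- ===== PORT A =====
def gordon (a : String) : String :=
  let a1 := PySem.Str.upper a
  let a2 := PySem.Str.replace a1 " " "!!!! "
  let a3 := PySem.Str.replace a2 "A" "@"
  let a4 := ["E", "I", "O", "U"].foldl (fun s i => PySem.Str.replace s i "*") a3
  a4 ++ "!!!!"

-- ===== PORT B =====
def gordonTable : PySem.Dict Char String :=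
  PySem.Dict.ofList [(' ', "!!!! "), ('A', "@"), ('E', "*"), ('I', "*"), ('O', "*"), ('U', "*")]

def gordon_alt (a : String) : String :=
  String.join ((PySem.Str.upper a).toList.map
    (fun c => PySem.Dict.getD gordonTable c (String.ofList [c]))) ++ "!!!!"

-- ===== PRECONDITION & SPEC =====
def Spec_gordon (a : String) (out : String) : Prop := out = gordon_alt a
instance (a : String) (out : String) : Decidable (Spec_gordon a out) := by unfold Spec_gordon; infer_instance

-- ===== CLAIM (what is proved, stated in full; the proofs are below) =====
def Claim_equal_gordon : Prop := ∀ (a : String), Dom_gordon a → Spec_gordon a (gordon a)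

-- ===== LEMMAS AND PROOFS =====

-- single-character replacement is a flatMap over the characters
theorem replace_go_single (c : Char) (new : List Char) :
    ∀ (s : List Char) (fuel : Nat) (acc : List Char), s.length ≤ fuel →
      PySem.Chars.replace.go [c] new fuel s acc
        = acc.reverse ++ s.flatMap (fun x => if x = c then new else [x]) := by
  intro s
  induction s with
  | nil =>
      intro fuel acc _
      cases fuel <;> simp [PySem.Chars.replace.go]
  | cons h t ih =>
      intro fuel acc hf
      cases fuel with
      | zero => simp at hf
      | succ n =>
          have ht : t.length ≤ n := by simpa using hf
          by_cases hc : h = c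
          · subst hc
            simp [PySem.Chars.replace.go, List.isPrefixOf, ih n _ ht]
          · simp [PySem.Chars.replace.go, List.isPrefixOf, Ne.symm hc,
              ih n _ ht, beq_iff_eq, hc]

theorem replace_single (c : Char) (new : List Char) (s : List Char) :
    PySem.Chars.replace s [c] new = s.flatMap (fun x => if x = c then new else [x]) := by
  simp [PySem.Chars.replace, replace_go_single c new s s.length [] le_rfl]

theorem toList_foldl_append (l : List String) :
    ∀ init : String, (l.foldl (fun r s => r ++ s) init).toList
      = init.toList ++ l.flatMap String.toList := by
  induction l with
  | nil => intro init; simp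
  | cons h t ih => intro init; simp [List.foldl, ih]

theorem toList_join_map (l : List Char) (f : Char → String) :
    (String.join (l.map f)).toList = l.flatMap (fun c => (f c).toList) := by
  simp [String.join, toList_foldl_append, List.flatMap_map]

theorem gordon_chainChar (c : Char) :
    ((((((if c = ' ' then "!!!! ".toList else [c]).flatMap
      (fun x => if x = 'A' then "@".toList else [x])).flatMap
      (fun x => if x = 'E' then "*".toList else [x])).flatMap
      (fun x => if x = 'I' then "*".toList else [x])).flatMap
      (fun x => if x = 'O' then "*".toList else [x])).flatMap
      (fun x => if x = 'U' then "*".toList else [x]))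
    = (PySem.Dict.getD gordonTable c (String.ofList [c])).toList := by
  by_cases h1 : c = ' '
  · subst h1; decide
  by_cases h2 : c = 'A'
  · subst h2; decide
  by_cases h3 : c = 'E'
  · subst h3; decide
  by_cases h4 : c = 'I'
  · subst h4; decide
  by_cases h5 : c = 'O'
  · subst h5; decide
  by_cases h6 : c = 'U'
  · subst h6; decide
  · simp [h1, h2, h3, h4, h5, h6, gordonTable, PySem.Dict.getD,
      PySem.Dict.ofList, PySem.Dict.update, PySem.Dict.get?_insert,
      PySem.Dict.get?_empty]

theorem gordon_chain_list (l : List Char) :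
    (((((l.flatMap (fun x => if x = ' ' then "!!!! ".toList else [x])).flatMap
      (fun x => if x = 'A' then "@".toList else [x])).flatMap
      (fun x => if x = 'E' then "*".toList else [x])).flatMap
      (fun x => if x = 'I' then "*".toList else [x])).flatMap
      (fun x => if x = 'O' then "*".toList else [x])).flatMap
      (fun x => if x = 'U' then "*".toList else [x])
    = l.flatMap (fun c => (PySem.Dict.getD gordonTable c (String.ofList [c])).toList) := by
  induction l with
  | nil => simp
  | cons h t ih =>
      have hc := gordon_chainChar h
      simp only [List.flatMap_cons, List.flatMap_append] at hc ⊢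
      rw [ih, ← hc]

-- ===== VERDICT (by name: the statement is the Claim_ definition above) =====
theorem gordon_spec : Claim_equal_gordon := by
  intro a _
  unfold Spec_gordon gordon gordon_alt
  refine (String.toList_inj.mp ?_)
  have h1 : " ".toList = [' '] := by decide
  have h2 : "A".toList = ['A'] := by decide
  have h3 : "E".toList = ['E'] := by decide
  have h4 : "I".toList = ['I'] := by decide
  have h5 : "O".toList = ['O'] := by decide
  have h6 : "U".toList = ['U'] := by decide
  simp only [List.foldl, toList_join_map, String.toList_append,
    PySem.Str.toList_replace, PySem.Str.toList_upper, h1, h2, h3, h4, h5, h6,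
    replace_single, gordon_chain_list]
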